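-- pv_equiv track=rewrite | github.com/LachlanB96/rogueLike | mapManager.py | changeTile
-- ===== SOURCE A (Python) =====
-- def changeTile(currentMap, tilePosX, tilePosY, newTile, branch=1, pattern="plus"):
--     if pattern == "plus":
--         for i in range(0,branch+1):
--             for j in range(0,i):
--                 currentMap[tilePosX-branch+i][tilePosY+j] = newTile
--                 currentMap[tilePosX-branch+i][tilePosY-j] = newTile
--                 currentMap[tilePosX+branch-i][tilePosY+j] = newTile
--                 currentMap[tilePosX+branch-i][tilePosY-j] = newTile
--
--
--     return currentMap
-- ===== SOURCE B (Python) =====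
-- def changeTile(currentMap, tilePosX, tilePosY, newTile, branch=1, pattern="plus"):
--     if pattern == "plus":
--         r = branch - 1
--         for dx in range(-r, r + 1):
--             limit = r - abs(dx)
--             for dy in range(-limit, limit + 1):
--                 currentMap[tilePosX + dx][tilePosY + dy] = newTile
--     return currentMap
-- ===== Notes on version B (the rewrite author's own statement) =====
-- stated objective: simpler
-- what changed: Replaces A's four mirrored quadrant writes (with duplicate assignments) driven by loops over i in 0..branch, j in 0..i-1 by a single row-by-row sweep over the Manhattan diamond: for each row offset dx the column span is computed from the distance budget branch-1-|dx| and each cell is written exactly once.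
import Mathlib
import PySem

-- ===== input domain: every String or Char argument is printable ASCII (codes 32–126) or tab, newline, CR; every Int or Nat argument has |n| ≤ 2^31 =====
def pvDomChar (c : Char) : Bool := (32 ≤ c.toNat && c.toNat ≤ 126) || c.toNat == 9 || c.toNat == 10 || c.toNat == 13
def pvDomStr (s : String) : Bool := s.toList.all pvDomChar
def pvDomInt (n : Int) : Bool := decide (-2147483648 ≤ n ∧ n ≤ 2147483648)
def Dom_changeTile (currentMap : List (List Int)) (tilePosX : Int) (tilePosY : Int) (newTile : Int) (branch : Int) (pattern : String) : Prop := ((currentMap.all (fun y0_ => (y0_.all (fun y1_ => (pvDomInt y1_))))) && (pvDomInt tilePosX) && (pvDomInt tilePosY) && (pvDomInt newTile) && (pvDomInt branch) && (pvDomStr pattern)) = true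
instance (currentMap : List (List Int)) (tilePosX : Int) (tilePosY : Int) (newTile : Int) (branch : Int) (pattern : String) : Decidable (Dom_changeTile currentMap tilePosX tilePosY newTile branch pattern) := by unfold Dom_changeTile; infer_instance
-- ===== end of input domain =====

-- B replaces A's four mirrored quadrant writes by a single row-by-row sweep of the
-- Manhattan diamond (same cells, each written once); both Pythons mutate currentMap in
-- place — the equivalence proved here is about the RETURN value.


-- `currentMap[r][c] = v` in Python: fetch row r, assign row[c] = v.
-- pySetD/pyGetD are PySem's total forms; they no-op exactly where Python raises
-- IndexError, and Pre_changeTile excludes those inputs.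
def writeCell (m : List (List Int)) (r c v : Int) : List (List Int) :=
  PySem.List.pySetD m r (PySem.List.pySetD (PySem.List.pyGetD m r []) c v)

-- ===== PORT A =====
def changeTile (currentMap : List (List Int)) (tilePosX : Int) (tilePosY : Int) (newTile : Int) (branch : Int) (pattern : String) : List (List Int) :=
  if pattern == "plus" then
    (PySem.List.pyRange 0 (branch + 1) 1).foldl (fun m i =>
      (PySem.List.pyRange 0 i 1).foldl (fun m j =>
        writeCell (writeCell (writeCell (writeCell m
          (tilePosX - branch + i) (tilePosY + j) newTile)
          (tilePosX - branch + i) (tilePosY - j) newTile)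
          (tilePosX + branch - i) (tilePosY + j) newTile)
          (tilePosX + branch - i) (tilePosY - j) newTile) m) currentMap
  else currentMap

-- ===== PORT B =====
def changeTile_alt (currentMap : List (List Int)) (tilePosX : Int) (tilePosY : Int) (newTile : Int) (branch : Int) (pattern : String) : List (List Int) :=
  if pattern == "plus" then
    let r := branch - 1
    (PySem.List.pyRange (-r) (r + 1) 1).foldl (fun m dx =>
      let limit := r - |dx|
      (PySem.List.pyRange (-limit) (limit + 1) 1).foldl (fun m dy =>
        writeCell m (tilePosX + dx) (tilePosY + dy) newTile) m) currentMap
  else currentMap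

-- ===== PRECONDITION & SPEC =====
-- Python cell access currentMap[r][c]: both indices in range (negative Python indexing allowed)
def cellOK (m : List (List Int)) (r c : Int) : Bool :=
  match PySem.List.pyGet? m r with
  | none => false
  | some row => (PySem.List.pyGet? row c).isSome

-- Pre_ excludes exactly the inputs where Python's A raises IndexError: with pattern "plus",
-- every cell of the Manhattan diamond of radius branch-1 around (tilePosX, tilePosY) must exist.
def Pre_changeTile (currentMap : List (List Int)) (tilePosX : Int) (tilePosY : Int) (newTile : Int) (branch : Int) (pattern : String) : Prop :=
  pattern = "plus" →
    ∀ dx ∈ PySem.List.pyRange (1 - branch) branch 1,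
      ∀ dy ∈ PySem.List.pyRange (|dx| + 1 - branch) (branch - |dx|) 1,
        cellOK currentMap (tilePosX + dx) (tilePosY + dy) = true
instance (currentMap : List (List Int)) (tilePosX : Int) (tilePosY : Int) (newTile : Int) (branch : Int) (pattern : String) : Decidable (Pre_changeTile currentMap tilePosX tilePosY newTile branch pattern) := by unfold Pre_changeTile; infer_instance

def pvWitness_changeTile : List (List Int) × Int × Int × Int × Int × String :=
  ([[0, 0, 0], [0, 0, 0], [0, 0, 0]], 1, 1, 7, 2, "plus")

def Spec_changeTile (currentMap : List (List Int)) (tilePosX : Int) (tilePosY : Int) (newTile : Int) (branch : Int) (pattern : String) (out : List (List Int)) : Prop := out = changeTile_alt currentMap tilePosX tilePosY newTile branch pattern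
instance (currentMap : List (List Int)) (tilePosX : Int) (tilePosY : Int) (newTile : Int) (branch : Int) (pattern : String) (out : List (List Int)) : Decidable (Spec_changeTile currentMap tilePosX tilePosY newTile branch pattern out) := by unfold Spec_changeTile; infer_instance

-- ===== CLAIM (what is proved, stated in full; the proofs are below) =====
def Claim_equal_changeTile : Prop := ∀ (currentMap : List (List Int)) (tilePosX : Int) (tilePosY : Int) (newTile : Int) (branch : Int) (pattern : String), Dom_changeTile currentMap tilePosX tilePosY newTile branch pattern → Pre_changeTile currentMap tilePosX tilePosY newTile branch pattern → Spec_changeTile currentMap tilePosX tilePosY newTile branch pattern (changeTile currentMap tilePosX tilePosY newTile branch pattern)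

-- ===== LEMMAS AND PROOFS =====

theorem pvWitness_ok : Dom_changeTile pvWitness_changeTile.1 pvWitness_changeTile.2.1 pvWitness_changeTile.2.2.1 pvWitness_changeTile.2.2.2.1 pvWitness_changeTile.2.2.2.2.1 pvWitness_changeTile.2.2.2.2.2 ∧ Pre_changeTile pvWitness_changeTile.1 pvWitness_changeTile.2.1 pvWitness_changeTile.2.2.1 pvWitness_changeTile.2.2.2.1 pvWitness_changeTile.2.2.2.2.1 pvWitness_changeTile.2.2.2.2.2 := by decide

-- normalized forms of the PySem write/read primitives
theorem pySetD_eq {α : Type} (xs : List α) (i : Int) (v : α) :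
    PySem.List.pySetD xs i v = match PySem.List.pyIdx? xs.length i with
      | none => xs
      | some a => xs.set a v := by
  cases h : PySem.List.pyIdx? xs.length i <;>
    simp [PySem.List.pySetD, PySem.List.pySet?, h]

theorem pyGetD_eq {α : Type} (xs : List α) (i : Int) (d : α) :
    PySem.List.pyGetD xs i d = match PySem.List.pyIdx? xs.length i with
      | none => d
      | some a => xs.getD a d := by
  cases h : PySem.List.pyIdx? xs.length i <;>
    simp [PySem.List.pyGetD, PySem.List.pyGet?, h, List.getD]

theorem pyIdx?_lt {n : Nat} {i : Int} {a : Nat} (h : PySem.List.pyIdx? n i = some a) : a < n := by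
  unfold PySem.List.pyIdx? at h
  split_ifs at h <;> simp_all <;> omega

-- row-level: writes of one fixed value commute and are idempotent
theorem pySetD_comm (row : List Int) (c1 c2 v : Int) :
    PySem.List.pySetD (PySem.List.pySetD row c1 v) c2 v
      = PySem.List.pySetD (PySem.List.pySetD row c2 v) c1 v := by
  cases h1 : PySem.List.pyIdx? row.length c1 <;> cases h2 : PySem.List.pyIdx? row.length c2 <;>
    simp [pySetD_eq, List.length_set, h1, h2]
  rename_i a1 a2
  by_cases hx : a1 = a2
  · subst hx; simp [List.set_set]
  · exact List.set_comm v v hx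

theorem pySetD_idem (row : List Int) (c v : Int) :
    PySem.List.pySetD (PySem.List.pySetD row c v) c v = PySem.List.pySetD row c v := by
  cases h : PySem.List.pyIdx? row.length c <;> simp [pySetD_eq, List.length_set, h, List.set_set]

theorem writeCell_eq (m : List (List Int)) (r c v : Int) :
    writeCell m r c v = match PySem.List.pyIdx? m.length r with
      | none => m
      | some a => m.set a (PySem.List.pySetD (m.getD a []) c v) := by
  cases h : PySem.List.pyIdx? m.length r <;>
    simp [writeCell, pySetD_eq, pyGetD_eq, h]

theorem length_writeCell (m : List (List Int)) (r c v : Int) :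
    (writeCell m r c v).length = m.length := by
  rw [writeCell_eq]
  cases PySem.List.pyIdx? m.length r <;> simp

-- cell-level: writes of one fixed value commute and are idempotent
theorem writeCell_comm (m : List (List Int)) (r1 c1 r2 c2 v : Int) :
    writeCell (writeCell m r1 c1 v) r2 c2 v = writeCell (writeCell m r2 c2 v) r1 c1 v := by
  rw [writeCell_eq (writeCell m r1 c1 v), writeCell_eq (writeCell m r2 c2 v),
      length_writeCell, length_writeCell, writeCell_eq m r1, writeCell_eq m r2]
  cases h1 : PySem.List.pyIdx? m.length r1 <;> cases h2 : PySem.List.pyIdx? m.length r2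
  · rfl
  · rfl
  · rfl
  · rename_i a1 a2
    by_cases hx : a1 = a2
    · subst hx
      have ha := pyIdx?_lt h1
      simp [List.getD, ha, List.set_set, pySetD_comm]
    · simp [List.getD, List.getElem?_set_ne hx, List.getElem?_set_ne (Ne.symm hx),
        List.set_comm _ _ hx]

theorem writeCell_idem (m : List (List Int)) (r c v : Int) :
    writeCell (writeCell m r c v) r c v = writeCell m r c v := by
  rw [writeCell_eq (writeCell m r c v), length_writeCell, writeCell_eq m r]
  cases h : PySem.List.pyIdx? m.length r
  · rfl
  · have ha := pyIdx?_lt h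
    simp [List.getD, ha, List.set_set, pySetD_idem]

-- folding writes of one fixed value over a list of cells
def wfold (v : Int) (m : List (List Int)) (L : List (Int × Int)) : List (List Int) :=
  L.foldl (fun m p => writeCell m p.1 p.2 v) m

theorem wfold_absorb (v : Int) (L : List (Int × Int)) :
    ∀ (m : List (List Int)) (p : Int × Int), p ∈ L →
      wfold v (writeCell m p.1 p.2 v) L = wfold v m L := by
  induction L with
  | nil => intro m p hp; cases hp
  | cons q L ih =>
    intro m p hp
    simp only [wfold, List.foldl_cons]
    rcases List.mem_cons.mp hp with h | h
    · subst h; rw [writeCell_idem]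
    · rw [writeCell_comm]; exact ih _ p h

theorem wfold_dedup (v : Int) (L : List (Int × Int)) :
    ∀ m : List (List Int), wfold v m L = wfold v m L.dedup := by
  induction L with
  | nil => intro m; rfl
  | cons q L ih =>
    intro m
    by_cases hq : q ∈ L
    · rw [List.dedup_cons_of_mem hq]
      show wfold v (writeCell m q.1 q.2 v) L = _
      rw [wfold_absorb v L _ q hq, ih]
    · rw [List.dedup_cons_of_notMem hq]
      show wfold v (writeCell m q.1 q.2 v) L = wfold v (writeCell m q.1 q.2 v) L.dedup
      exact ih _

-- the result of writing one value over a cell list depends only on the SET of cells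
theorem wfold_congr_mem (v : Int) (L1 L2 : List (Int × Int)) (m : List (List Int))
    (h : ∀ p, p ∈ L1 ↔ p ∈ L2) : wfold v m L1 = wfold v m L2 := by
  rw [wfold_dedup v L1, wfold_dedup v L2]
  have hperm : L1.dedup.Perm L2.dedup :=
    (List.perm_ext_iff_of_nodup (List.nodup_dedup _) (List.nodup_dedup _)).mpr
      (fun p => by simp only [List.mem_dedup]; exact h p)
  exact hperm.foldl_eq' (fun p _ q _ z => writeCell_comm z p.1 p.2 q.1 q.2 v) m

-- the cell lists the two ports write, in their own orders
def writesA (x y b : Int) : List (Int × Int) :=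
  (PySem.List.pyRange 0 (b + 1) 1).flatMap (fun i =>
    (PySem.List.pyRange 0 i 1).flatMap (fun j =>
      [(x - b + i, y + j), (x - b + i, y - j), (x + b - i, y + j), (x + b - i, y - j)]))

def writesB (x y b : Int) : List (Int × Int) :=
  (PySem.List.pyRange (-(b - 1)) b 1).flatMap (fun dx =>
    (PySem.List.pyRange (-(b - 1 - |dx|)) (b - 1 - |dx| + 1) 1).map (fun dy =>
      (x + dx, y + dy)))

-- both cell lists are exactly the Manhattan diamond of radius b-1
theorem mem_writesA (x y b : Int) (p : Int × Int) :
    p ∈ writesA x y b ↔ |p.1 - x| + |p.2 - y| ≤ b - 1 := by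
  obtain ⟨u, w⟩ := p
  simp only [writesA, List.mem_flatMap, PySem.List.mem_pyRange_one, List.mem_cons,
    List.not_mem_nil, or_false, Prod.mk.injEq]
  rw [Int.abs_eq_natAbs, Int.abs_eq_natAbs]
  constructor
  · rintro ⟨i, ⟨hi0, hi1⟩, j, ⟨hj0, hj1⟩, (⟨h1, h2⟩ | ⟨h1, h2⟩ | ⟨h1, h2⟩ | ⟨h1, h2⟩)⟩ <;> omega
  · intro h
    rcases le_or_gt u x with hu | hu <;> rcases le_or_gt y w with hw | hw
    · exact ⟨b - (x - u), ⟨by omega, by omega⟩, w - y, ⟨by omega, by omega⟩,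
        Or.inl ⟨by omega, by omega⟩⟩
    · exact ⟨b - (x - u), ⟨by omega, by omega⟩, y - w, ⟨by omega, by omega⟩,
        Or.inr (Or.inl ⟨by omega, by omega⟩)⟩
    · exact ⟨b - (u - x), ⟨by omega, by omega⟩, w - y, ⟨by omega, by omega⟩,
        Or.inr (Or.inr (Or.inl ⟨by omega, by omega⟩))⟩
    · exact ⟨b - (u - x), ⟨by omega, by omega⟩, y - w, ⟨by omega, by omega⟩,
        Or.inr (Or.inr (Or.inr ⟨by omega, by omega⟩))⟩

theorem mem_writesB (x y b : Int) (p : Int × Int) :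
    p ∈ writesB x y b ↔ |p.1 - x| + |p.2 - y| ≤ b - 1 := by
  obtain ⟨u, w⟩ := p
  simp only [writesB, List.mem_flatMap, List.mem_map, PySem.List.mem_pyRange_one,
    Prod.mk.injEq, Int.abs_eq_natAbs]
  constructor
  · rintro ⟨dx, ⟨h1, h2⟩, dy, ⟨h3, h4⟩, h5, h6⟩; omega
  · intro h
    exact ⟨u - x, ⟨by omega, by omega⟩, w - y, ⟨by omega, by omega⟩, by omega, by omega⟩

-- each port IS the fold of its cell list
theorem changeTile_eq_wfold (m : List (List Int)) (x y v b : Int) :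
    changeTile m x y v b "plus" = wfold v m (writesA x y b) := by
  simp [changeTile, wfold, writesA, List.foldl_flatMap]

theorem changeTile_alt_eq_wfold (m : List (List Int)) (x y v b : Int) :
    changeTile_alt m x y v b "plus" = wfold v m (writesB x y b) := by
  simp only [changeTile_alt, wfold, writesB, List.foldl_flatMap, List.foldl_map]
  norm_num

-- ===== VERDICT (by name: the statement is the Claim_ definition above) =====
theorem changeTile_spec : Claim_equal_changeTile := by
  intro m x y v b pat _ _
  unfold Spec_changeTile
  by_cases hp : pat = "plus"
  · subst hp
    rw [changeTile_eq_wfold, changeTile_alt_eq_wfold]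
    exact wfold_congr_mem v _ _ m (fun p => (mem_writesA x y b p).trans (mem_writesB x y b p).symm)
  · simp [changeTile, changeTile_alt, hp]
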